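-- pv_equiv track=rewrite | github.com/imkevinkuo/tjhsst | computervision/basics.py | hardEdges
-- ===== SOURCE A (Python) =====
-- def hardEdges(img, edgePoints, aboveFloor):
--     toAdd = {}
--     middle = {point for point in aboveFloor if point not in edgePoints}
--     for point in middle:
--         for dc in range(-1, 2):
--             for dr in range(-1, 2):
--                 if (point[0]+dc, point[1]+dr) in edgePoints:
--                     toAdd[point] = 0
--                     break
--     return toAdd
-- ===== SOURCE B (Python) =====
-- def hardEdges(img, edgePoints, aboveFloor):
--     edgeSet = set(edgePoints)
--     near = {(e[0] + dc, e[1] + dr) for e in edgeSet for dc in range(-1, 2) for dr in range(-1, 2)}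
--     return {p: 0 for p in aboveFloor if p not in edgeSet and p in near}
-- ===== Notes on version B (the rewrite author's own statement) =====
-- stated objective: alternative
-- what changed: Instead of scanning the edge list 9 times for every middle point, B builds the edge set and its precomputed ±1 dilation once, then marks points in a single set-membership pass over aboveFloor; asymptotically O(m+e) expected vs A's O(m*e), though the harness's a timing run did not confirm a measured speedup.
import Mathlib
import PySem

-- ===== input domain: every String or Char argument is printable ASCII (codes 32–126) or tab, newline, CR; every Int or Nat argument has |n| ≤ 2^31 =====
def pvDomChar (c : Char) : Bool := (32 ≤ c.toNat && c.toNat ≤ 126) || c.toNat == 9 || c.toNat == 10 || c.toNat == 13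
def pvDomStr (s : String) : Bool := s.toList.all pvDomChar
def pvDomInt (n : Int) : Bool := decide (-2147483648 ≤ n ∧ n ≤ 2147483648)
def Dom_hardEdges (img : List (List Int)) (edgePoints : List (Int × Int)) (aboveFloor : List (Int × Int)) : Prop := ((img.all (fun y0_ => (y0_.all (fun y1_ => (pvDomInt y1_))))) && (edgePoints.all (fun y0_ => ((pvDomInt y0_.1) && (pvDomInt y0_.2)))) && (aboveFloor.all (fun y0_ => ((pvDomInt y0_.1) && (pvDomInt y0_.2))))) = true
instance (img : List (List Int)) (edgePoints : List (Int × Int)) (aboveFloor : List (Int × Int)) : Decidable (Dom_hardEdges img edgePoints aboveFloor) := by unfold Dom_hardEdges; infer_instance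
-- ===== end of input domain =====

-- B replaces A's per-middle-point 9-neighbour scans of the edge LIST by one precomputed
-- edge set and its ±1 dilation, then a single set-membership pass over aboveFloor (different algorithm).


-- ===== PORT A =====
-- inner loop 'for dr in range(-1,2): if (point[0]+dc, point[1]+dr) in edgePoints: toAdd[point]=0; break'
def hardEdgesDr (edgePoints : List (Int × Int)) (p : Int × Int) (dc : Int)
    (d : PySem.Dict (Int × Int) Int) : List Int → PySem.Dict (Int × Int) Int
  | [] => d
  | dr :: rest =>
      if (p.1 + dc, p.2 + dr) ∈ edgePoints then d.insert p 0
      else hardEdgesDr edgePoints p dc d rest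

def hardEdges (img : List (List Int)) (edgePoints : List (Int × Int)) (aboveFloor : List (Int × Int)) : List (Int × Int × Int) :=
  -- middle = {point for point in aboveFloor if point not in edgePoints}
  let middle : PySem.Set (Int × Int) :=
    PySem.Set.ofList (aboveFloor.filter (fun p => !(decide (p ∈ edgePoints))))
  -- for point in middle: for dc in range(-1,2): <dr loop>
  let toAdd : PySem.Dict (Int × Int) Int :=
    middle.foldl (fun d p =>
      (PySem.List.pyRange (-1) 2 1).foldl (fun d dc =>
        hardEdgesDr edgePoints p dc d (PySem.List.pyRange (-1) 2 1)) d)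
      PySem.Dict.empty
  toAdd.items.map (fun q => (q.1.1, q.1.2, q.2))

-- ===== PORT B =====
def hardEdges_alt (img : List (List Int)) (edgePoints : List (Int × Int)) (aboveFloor : List (Int × Int)) : List (Int × Int × Int) :=
  let edgeSet : PySem.Set (Int × Int) := PySem.Set.ofList edgePoints
  -- near = {(e[0]+dc, e[1]+dr) for e in edgeSet for dc in range(-1,2) for dr in range(-1,2)}
  let near : PySem.Set (Int × Int) :=
    PySem.Set.ofList (edgeSet.flatMap (fun e =>
      (PySem.List.pyRange (-1) 2 1).flatMap (fun dc =>
        (PySem.List.pyRange (-1) 2 1).map (fun dr => (e.1 + dc, e.2 + dr)))))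
  -- {p: 0 for p in aboveFloor if p not in edgeSet and p in near}
  let d : PySem.Dict (Int × Int) Int :=
    aboveFloor.foldl (fun d p =>
      if !(PySem.Set.contains edgeSet p) && PySem.Set.contains near p then d.insert p 0 else d)
      PySem.Dict.empty
  d.items.map (fun q => (q.1.1, q.1.2, q.2))

-- ===== PRECONDITION & SPEC =====
def Spec_hardEdges (img : List (List Int)) (edgePoints : List (Int × Int)) (aboveFloor : List (Int × Int)) (out : List (Int × Int × Int)) : Prop := out = hardEdges_alt img edgePoints aboveFloor
instance (img : List (List Int)) (edgePoints : List (Int × Int)) (aboveFloor : List (Int × Int)) (out : List (Int × Int × Int)) : Decidable (Spec_hardEdges img edgePoints aboveFloor out) := by unfold Spec_hardEdges; infer_instance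

-- ===== CLAIM (what is proved, stated in full; the proofs are below) =====
def Claim_equal_hardEdges : Prop := ∀ (img : List (List Int)) (edgePoints : List (Int × Int)) (aboveFloor : List (Int × Int)), Dom_hardEdges img edgePoints aboveFloor → Spec_hardEdges img edgePoints aboveFloor (hardEdges img edgePoints aboveFloor)

-- ===== LEMMAS AND PROOFS =====

-- 'p has a neighbour (incl. itself) in edgePoints', as A's nested any
def pvAdj (E : List (Int × Int)) (p : Int × Int) : Bool :=
  (PySem.List.pyRange (-1) 2 1).any (fun dc =>
    (PySem.List.pyRange (-1) 2 1).any (fun dr => decide ((p.1 + dc, p.2 + dr) ∈ E)))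

theorem hardEdgesDr_eq (E : List (Int × Int)) (p : Int × Int) (dc : Int)
    (d : PySem.Dict (Int × Int) Int) (L : List Int) :
    hardEdgesDr E p dc d L =
      if L.any (fun dr => decide ((p.1 + dc, p.2 + dr) ∈ E)) then d.insert p 0 else d := by
  induction L with
  | nil => simp [hardEdgesDr]
  | cons dr rest ih =>
      by_cases h : (p.1 + dc, p.2 + dr) ∈ E <;> simp [hardEdgesDr, h, ih]

theorem foldl_if_insert {α : Type} (c : α → Bool) (p : Int × Int)
    (L : List α) (d : PySem.Dict (Int × Int) Int) :
    L.foldl (fun d x => if c x then d.insert p 0 else d) d =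
      if L.any c then d.insert p 0 else d := by
  induction L generalizing d with
  | nil => simp
  | cons x rest ih =>
      by_cases h : c x = true <;>
        simp [h, ih, PySem.Dict.insert_insert_self]

-- the dict-building fold over an 'if c p then d[p]=0' body, with keys tracked as a list
theorem foldl_insert_items (c : (Int × Int) → Bool) (xs : List (Int × Int))
    (d : PySem.Dict (Int × Int) Int) (s : List (Int × Int))
    (hd : d.items = s.map (fun p => (p, 0)))
    (hs : s.Nodup) :
    (xs.foldl (fun d p => if c p then d.insert p 0 else d) d).items =
      (PySem.Set.update s (xs.filter c)).map (fun p => (p, 0)) := by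
  induction xs generalizing d s with
  | nil => simpa [PySem.Set.update] using hd
  | cons x rest ih =>
      have hkeys : PySem.Dict.keys d = s := by
        simp [PySem.Dict.keys, hd, Function.comp_def]
      by_cases hc : c x = true
      · by_cases hm : x ∈ s
        · have hcont : d.contains x = true := by
            rw [PySem.Dict.contains_iff_mem_keys, hkeys]; exact hm
          have hitems : (d.insert x 0).items = d.items := by
            rw [PySem.Dict.items_insert_of_contains _ _ hcont, hd]
            simp only [List.map_map, List.map_inj_left]
            intro a _
            by_cases hax : a = x <;> simp [hax]
          have := ih (d.insert x 0) s (by rw [hitems, hd]) hs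
          simpa [hc, PySem.Set.update_cons, PySem.Set.add_of_mem hm] using this
        · have hcont : d.contains x = false := by
            rw [Bool.eq_false_iff]
            intro hco
            rw [PySem.Dict.contains_iff_mem_keys, hkeys] at hco
            exact hm hco
          have hitems : (d.insert x 0).items = (s ++ [x]).map (fun p => (p, 0)) := by
            rw [PySem.Dict.items_insert_of_not_contains _ _ hcont, hd]; simp
          have hnd : (s ++ [x]).Nodup :=
            hs.append (List.nodup_singleton x)
              (by intro a ha hax
                  rw [List.mem_singleton] at hax
                  exact hm (hax ▸ ha))
          have := ih (d.insert x 0) (s ++ [x]) hitems hnd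
          simpa [hc, PySem.Set.update_cons, PySem.Set.add_of_not_mem hm] using this
      · have := ih d s hd hs
        simpa [hc, PySem.Set.update_cons] using this

-- dedup commutes with filter
theorem ofList_filter {α : Type} [BEq α] [LawfulBEq α] (l : List α) (q : α → Bool) :
    (PySem.Set.ofList l).filter q = PySem.Set.ofList (l.filter q) := by
  induction l using List.reverseRecOn with
  | nil => simp [PySem.Set.ofList_nil]
  | append_singleton xs x ih =>
      rw [PySem.Set.ofList_append_singleton, PySem.Set.add_eq_ite]
      by_cases hm : x ∈ PySem.Set.ofList xs
      · have hmx : x ∈ xs := (PySem.Set.mem_ofList _ _).1 hm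
        by_cases hq : q x = true
        · rw [if_pos hm, List.filter_append, ih]
          have hx2 : x ∈ PySem.Set.ofList (xs.filter q) := by
            rw [PySem.Set.mem_ofList, List.mem_filter]; exact ⟨hmx, hq⟩
          simp [hq, PySem.Set.ofList_append_singleton, PySem.Set.add_of_mem hx2]
        · simp [hm, List.filter_append, ih, hq]
      · have hmx : x ∉ xs := fun h => hm ((PySem.Set.mem_ofList _ _).2 h)
        rw [if_neg hm, List.filter_append, List.filter_append, ih]
        by_cases hq : q x = true
        · have hx2 : x ∉ PySem.Set.ofList (xs.filter q) := by
            rw [PySem.Set.mem_ofList, List.mem_filter]; exact fun h => hmx h.1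
          simp [hq, PySem.Set.ofList_append_singleton, PySem.Set.add_of_not_mem hx2]
        · simp [hq]

-- B's condition equals A's condition, pointwise
theorem cond_eq (E : List (Int × Int)) (p : Int × Int) :
    (!(PySem.Set.contains (PySem.Set.ofList E) p) &&
      PySem.Set.contains (PySem.Set.ofList ((PySem.Set.ofList E).flatMap (fun e =>
        (PySem.List.pyRange (-1) 2 1).flatMap (fun dc =>
          (PySem.List.pyRange (-1) 2 1).map (fun dr => (e.1 + dc, e.2 + dr)))))) p)
      = (!(decide (p ∈ E)) && pvAdj E p) := by
  obtain ⟨p1, p2⟩ := p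
  have h1 : PySem.Set.contains (PySem.Set.ofList E) (p1, p2) = decide ((p1, p2) ∈ E) := by
    simp [PySem.Set.mem_ofList]
  have h2 : (PySem.Set.contains (PySem.Set.ofList ((PySem.Set.ofList E).flatMap (fun e =>
      (PySem.List.pyRange (-1) 2 1).flatMap (fun dc =>
        (PySem.List.pyRange (-1) 2 1).map (fun dr => (e.1 + dc, e.2 + dr)))))) (p1, p2))
      = pvAdj E (p1, p2) := by
    cases hA : pvAdj E (p1, p2) with
    | false =>
        cases hcv : (PySem.Set.contains (PySem.Set.ofList ((PySem.Set.ofList E).flatMap (fun e =>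
            (PySem.List.pyRange (-1) 2 1).flatMap (fun dc =>
              (PySem.List.pyRange (-1) 2 1).map (fun dr => (e.1 + dc, e.2 + dr)))))) (p1, p2)) with
        | false => rfl
        | true =>
            exfalso
            rw [PySem.Set.contains_iff, PySem.Set.mem_ofList] at hcv
            rcases List.mem_flatMap.1 hcv with ⟨e, heS, he⟩
            rcases List.mem_flatMap.1 he with ⟨dc, hdc, hdcm⟩
            rcases List.mem_map.1 hdcm with ⟨dr, hdr, hpe⟩
            obtain ⟨e1, e2⟩ := e
            have heE : (e1, e2) ∈ E := (PySem.Set.mem_ofList _ _).1 heS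
            rw [PySem.List.mem_pyRange_one] at hdc hdr
            rw [Prod.mk.injEq] at hpe
            have hA' : pvAdj E (p1, p2) = true := by
              unfold pvAdj
              rw [List.any_eq_true]
              refine ⟨-dc, ?_, ?_⟩
              · rw [PySem.List.mem_pyRange_one]; omega
              · rw [List.any_eq_true]
                refine ⟨-dr, ?_, ?_⟩
                · rw [PySem.List.mem_pyRange_one]; omega
                · have hpe1 : p1 + -dc = e1 := by omega
                  have hpe2 : p2 + -dr = e2 := by omega
                  simpa [hpe1, hpe2] using heE
            rw [hA] at hA'
            exact Bool.false_ne_true hA'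
    | true =>
        have hA' := hA
        unfold pvAdj at hA'
        rw [List.any_eq_true] at hA'
        rcases hA' with ⟨dc, hdc, hin⟩
        rw [List.any_eq_true] at hin
        rcases hin with ⟨dr, hdr, hmem⟩
        have hmem' : (p1 + dc, p2 + dr) ∈ E := of_decide_eq_true hmem
        rw [PySem.List.mem_pyRange_one] at hdc hdr
        rw [PySem.Set.contains_iff, PySem.Set.mem_ofList]
        apply List.mem_flatMap.2
        refine ⟨(p1 + dc, p2 + dr), (PySem.Set.mem_ofList _ _).2 hmem', ?_⟩
        apply List.mem_flatMap.2
        refine ⟨-dc, ?_, ?_⟩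
        · rw [PySem.List.mem_pyRange_one]; omega
        · apply List.mem_map.2
          refine ⟨-dr, ?_, ?_⟩
          · rw [PySem.List.mem_pyRange_one]; omega
          · rw [Prod.mk.injEq]; constructor <;> omega
  rw [h1, h2]

-- ===== VERDICT (by name: the statement is the Claim_ definition above) =====
theorem hardEdges_spec : Claim_equal_hardEdges := by
  intro img E aF _
  unfold Spec_hardEdges hardEdges hardEdges_alt
  -- A's dict as a single conditional-insert fold
  have hA : ∀ (d : PySem.Dict (Int × Int) Int) (p : Int × Int),
      (PySem.List.pyRange (-1) 2 1).foldl (fun d dc =>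
        hardEdgesDr E p dc d (PySem.List.pyRange (-1) 2 1)) d
      = if pvAdj E p then d.insert p 0 else d := by
    intro d p
    have hcongr : (PySem.List.pyRange (-1) 2 1).foldl (fun d dc =>
        hardEdgesDr E p dc d (PySem.List.pyRange (-1) 2 1)) d
        = (PySem.List.pyRange (-1) 2 1).foldl (fun d dc =>
            if (PySem.List.pyRange (-1) 2 1).any
                (fun dr => decide ((p.1 + dc, p.2 + dr) ∈ E)) then d.insert p 0 else d) d := by
      apply PySem.List.foldl_congr_mem
      intro d' dc _
      exact hardEdgesDr_eq E p dc d' _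
    rw [hcongr, foldl_if_insert]
    rfl
  have hAfold : (((PySem.Set.ofList (aF.filter (fun p => !(decide (p ∈ E))))).foldl
      (fun d p => (PySem.List.pyRange (-1) 2 1).foldl (fun d dc =>
        hardEdgesDr E p dc d (PySem.List.pyRange (-1) 2 1)) d) PySem.Dict.empty))
      = ((PySem.Set.ofList (aF.filter (fun p => !(decide (p ∈ E))))).foldl
        (fun d p => if pvAdj E p then d.insert p 0 else d) PySem.Dict.empty) := by
    apply PySem.List.foldl_congr_mem
    intro d p _
    exact hA d p
  simp only [hAfold]
  -- both item lists via the accumulation lemma (starting dict empty, key list [])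
  rw [foldl_insert_items (pvAdj E) _ PySem.Dict.empty [] (by rfl) List.nodup_nil]
  rw [foldl_insert_items _ aF PySem.Dict.empty [] (by rfl) List.nodup_nil]
  rw [PySem.Set.update_nil_left, PySem.Set.update_nil_left]
  congr 1
  -- the two deduplicated key lists coincide
  have hBcond : aF.filter (fun p =>
      !(PySem.Set.contains (PySem.Set.ofList E) p) &&
        PySem.Set.contains (PySem.Set.ofList ((PySem.Set.ofList E).flatMap (fun e =>
          (PySem.List.pyRange (-1) 2 1).flatMap (fun dc =>
            (PySem.List.pyRange (-1) 2 1).map (fun dr => (e.1 + dc, e.2 + dr)))))) p)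
      = (aF.filter (fun p => !(decide (p ∈ E)))).filter (pvAdj E) := by
    rw [List.filter_filter]
    apply List.filter_congr
    intro p _
    rw [cond_eq E p, Bool.and_comm]
  rw [hBcond, ofList_filter, PySem.Set.ofList_ofList]
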